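-- pv_equiv track=rewrite | github.com/thaReal/MasterChef | codeforces/round_624/weirdsort.py | weirdsort
-- ===== SOURCE A (Python) =====
-- def weirdsort(a,b):
-- 	for i in range(len(a)-1):
-- 		if i+1 in b:
-- 			continue
--
-- 		s1 = a[0:i+1]
-- 		s2 = a[i+1::]
-- 		if max(s1) > min(s2):
-- 			return "NO"
--
-- 	return "YES"
-- ===== SOURCE B (Python) =====
-- def weirdsort(a, b):
--     if not a:
--         return "YES"
--     allowed = set(b)
--     # suffix minima: sufmin[i] = min(a[i:])
--     sufmin = []
--     m = None
--     for x in reversed(a):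
--         m = x if m is None else min(x, m)
--         sufmin.append(m)
--     sufmin.reverse()
--     pmax = a[0]
--     i = 1
--     for x, sm in zip(a[1:], sufmin[1:]):
--         if i not in allowed and pmax > sm:
--             return "NO"
--         pmax = max(pmax, x)
--         i += 1
--     return "YES"
-- ===== Notes on version B (the rewrite author's own statement) =====
-- stated objective: faster
-- what changed: Replaces the per-cut max(prefix)/min(suffix) rescans with one precomputed suffix-minima array, a set for b, and a single pass keeping a running prefix maximum.
import Mathlib
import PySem

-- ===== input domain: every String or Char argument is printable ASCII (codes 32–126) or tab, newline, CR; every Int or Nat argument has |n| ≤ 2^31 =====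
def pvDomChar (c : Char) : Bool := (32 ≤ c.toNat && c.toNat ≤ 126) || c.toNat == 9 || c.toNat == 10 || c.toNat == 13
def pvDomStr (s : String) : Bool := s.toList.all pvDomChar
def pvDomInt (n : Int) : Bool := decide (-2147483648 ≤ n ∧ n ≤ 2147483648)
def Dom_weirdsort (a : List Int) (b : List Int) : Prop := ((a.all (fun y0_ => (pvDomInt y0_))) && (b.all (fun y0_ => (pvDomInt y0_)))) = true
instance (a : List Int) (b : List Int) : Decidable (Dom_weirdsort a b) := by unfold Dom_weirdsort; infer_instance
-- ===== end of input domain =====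

-- B replaces A's per-cut max(prefix)/min(suffix) rescans with a precomputed
-- suffix-minima array, a set for b, and one pass with a running prefix max (faster).

-- ===== PORT A =====
-- the loop body of A; the `| none` match arms are unreachable (both slices are
-- nonempty for every i in range(len(a)-1)), so Python's max/min never raise
def aLoop (a b : List Int) : List Int → String
  | [] => "YES"
  | i :: rest =>
    if (i + 1) ∈ b then aLoop a b rest
    else
      -- s1 = a[0:i+1], s2 = a[i+1:], inlined into the match
      match PySem.List.max? (PySem.List.slice a (some 0) (some (i + 1))) (fun y => y),
            PySem.List.min? (PySem.List.slice a (some (i + 1)) none) (fun y => y) with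
      | some mx, some mn => if mx > mn then "NO" else aLoop a b rest
      | _, _ => "NO"

def weirdsort (a : List Int) (b : List Int) : String :=
  aLoop a b (PySem.List.pyRange 0 ((a.length : Int) - 1) 1)

-- ===== PORT B =====
-- suffix minima of a list (Source B builds it by a reversed loop; structural recursion here)
def suffixMins : List Int → List Int
  | [] => []
  | x :: xs =>
    match suffixMins xs with
    | [] => [x]
    | m :: ms => min x m :: m :: ms

-- B's main loop over zip(a[1:], sufmin[1:]) carrying (pmax, i)
def altLoop (allowed : PySem.Set Int) : Int → Int → List (Int × Int) → String
  | _, _, [] => "YES"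
  | pmax, i, (x, sm) :: rest =>
    if i ∉ allowed ∧ pmax > sm then "NO"
    else altLoop allowed (max pmax x) (i + 1) rest

def weirdsort_alt (a : List Int) (b : List Int) : String :=
  match a with
  | [] => "YES"
  | x :: xs =>
    altLoop (PySem.Set.ofList b) x 1 (xs.zip ((suffixMins (x :: xs)).tail))

-- ===== PRECONDITION & SPEC =====
def Spec_weirdsort (a : List Int) (b : List Int) (out : String) : Prop := out = weirdsort_alt a b
instance (a : List Int) (b : List Int) (out : String) : Decidable (Spec_weirdsort a b out) := by unfold Spec_weirdsort; infer_instance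

-- ===== CLAIM (what is proved, stated in full; the proofs are below) =====
def Claim_equal_weirdsort : Prop := ∀ (a : List Int) (b : List Int), Dom_weirdsort a b → Spec_weirdsort a b (weirdsort a b)

-- ===== LEMMAS AND PROOFS =====

lemma foldl_min_hoist (t : List Int) : ∀ (y z : Int),
    t.foldl min (min y z) = min y (t.foldl min z) := by
  induction t with
  | nil => intro y z; simp
  | cons w t ih =>
    intro y z
    simp only [List.foldl_cons]
    rw [min_assoc y z w, ih y (min z w)]

lemma suffixMins_cons (y : Int) (t : List Int) :
    suffixMins (y :: t) = (t.foldl min y) :: suffixMins t := by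
  induction t generalizing y with
  | nil => simp [suffixMins]
  | cons z t' ih =>
    rw [suffixMins, ih z]
    have : (z :: t').foldl min y = min y (t'.foldl min z) := by
      show t'.foldl min (min y z) = min y (t'.foldl min z)
      exact foldl_min_hoist t' y z
    rw [this]

lemma key (b : List Int) (s : List Int) : ∀ (x : Int) (xs : List Int),
    aLoop (x :: (xs ++ s)) b
      (PySem.List.pyRange (xs.length : Int) (((x :: (xs ++ s)).length : Int) - 1) 1)
    = altLoop (PySem.Set.ofList b) (xs.foldl max x) ((xs.length : Int) + 1)
        (s.zip (suffixMins s)) := by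
  induction s with
  | nil =>
    intro x xs
    rw [PySem.List.pyRange_one_eq_nil (by
      simp only [List.length_cons, List.length_append, List.length_nil]
      push_cast; omega)]
    simp [aLoop, altLoop]
  | cons y t ih =>
    intro x xs
    have hlt : (xs.length : Int) < ((x :: (xs ++ y :: t)).length : Int) - 1 := by
      simp only [List.length_cons, List.length_append]
      push_cast; omega
    rw [PySem.List.pyRange_one_cons hlt]
    rw [aLoop]
    have hs1 : PySem.List.slice (x :: (xs ++ y :: t)) (some 0) (some ((xs.length : Int) + 1))
        = x :: xs := by
      have : ((xs.length : Int) + 1) = ((xs.length + 1 : Nat) : Int) := by push_cast; ring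
      rw [this, PySem.List.slice_zero_start, PySem.List.slice_to_natCast]
      have : x :: (xs ++ y :: t) = (x :: xs) ++ (y :: t) := by simp
      rw [this]
      have hl : xs.length + 1 = (x :: xs).length := by simp
      rw [hl, List.take_left]
    have hs2 : PySem.List.slice (x :: (xs ++ y :: t)) (some ((xs.length : Int) + 1)) none
        = y :: t := by
      have : ((xs.length : Int) + 1) = ((xs.length + 1 : Nat) : Int) := by push_cast; ring
      rw [this, PySem.List.slice_from_natCast]
      have : x :: (xs ++ y :: t) = (x :: xs) ++ (y :: t) := by simp
      rw [this]
      have hl : xs.length + 1 = (x :: xs).length := by simp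
      rw [hl, List.drop_left]
    have hIH := ih x (xs ++ [y])
    have hx : x :: ((xs ++ [y]) ++ t) = x :: (xs ++ y :: t) := by simp
    rw [hx] at hIH
    have hlen : (((xs ++ [y]).length : Nat) : Int) = (xs.length : Int) + 1 := by
      simp
    rw [hlen] at hIH
    have hfold : (xs ++ [y]).foldl max x = max (xs.foldl max x) y := by
      rw [List.foldl_append]; simp
    rw [hfold] at hIH
    -- unfold the B side one step
    rw [suffixMins_cons]
    by_cases hb : ((xs.length : Int) + 1) ∈ b
    · rw [if_pos hb, hIH]
      simp only [altLoop, List.zip_cons_cons]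
      have hmem : ((xs.length : Int) + 1) ∈ PySem.Set.ofList b :=
        (PySem.Set.mem_ofList b _).mpr hb
      rw [if_neg (by simp [hmem])]
    · rw [if_neg hb, hs1, hs2, PySem.List.max?_id_cons, PySem.List.min?_id_cons]
      have hmem : ((xs.length : Int) + 1) ∉ PySem.Set.ofList b := by
        simp [PySem.Set.mem_ofList, hb]
      simp only [altLoop, List.zip_cons_cons]
      by_cases hcmp : List.foldl max x xs > List.foldl min y t
      · rw [if_pos hcmp, if_pos (And.intro hmem hcmp)]
      · rw [if_neg hcmp, if_neg (fun h => hcmp h.2), hIH]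

-- ===== VERDICT (by name: the statement is the Claim_ definition above) =====
theorem weirdsort_spec : Claim_equal_weirdsort := by
  intro a b _
  show weirdsort a b = weirdsort_alt a b
  cases a with
  | nil =>
    rw [weirdsort, PySem.List.pyRange_one_eq_nil (by norm_num)]
    rfl
  | cons x xs =>
    rw [weirdsort, weirdsort_alt]
    have h := key b xs x []
    simp only [List.nil_append, List.length_nil, Nat.cast_zero, zero_add,
      List.foldl_nil] at h
    rw [h, suffixMins_cons, List.tail_cons]
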